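-- pv_equiv track=rewrite | github.com/Serien3/cuteFC-web | backend/app/services/result_service.py | _bucket_lengths
-- ===== SOURCE A (Python) =====
-- def _bucket_lengths(lengths: list[int]) -> dict[str, int]:
--     buckets = {"0-49": 0, "50-100": 0, "101-500": 0, "501+": 0}
--     for length in lengths:
--         if length <= 49:
--             buckets["0-49"] += 1
--         elif length <= 100:
--             buckets["50-100"] += 1
--         elif length <= 500:
--             buckets["101-500"] += 1
--         else:
--             buckets["501+"] += 1
--     return buckets
-- ===== SOURCE B (Python) =====
-- def _bisect_left(a, x):
--     lo, hi = 0, len(a)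
--     while lo < hi:
--         mid = (lo + hi) // 2
--         if a[mid] < x:
--             lo = mid + 1
--         else:
--             hi = mid
--     return lo
--
--
-- def _bucket_lengths(lengths: list[int]) -> dict[str, int]:
--     thresholds = [49, 100, 500]
--     labels = ["0-49", "50-100", "101-500", "501+"]
--     buckets = {label: 0 for label in labels}
--     for length in lengths:
--         buckets[labels[_bisect_left(thresholds, length)]] += 1
--     return buckets
-- ===== Notes on version B (the rewrite author's own statement) =====
-- stated objective: idiomatic
-- what changed: Replaces the if/elif threshold cascade with a boundary table [49,100,500] plus a hand-written bisect_left binary search selecting the bucket label, over a pre-seeded {label: 0} dict.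
import Mathlib
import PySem

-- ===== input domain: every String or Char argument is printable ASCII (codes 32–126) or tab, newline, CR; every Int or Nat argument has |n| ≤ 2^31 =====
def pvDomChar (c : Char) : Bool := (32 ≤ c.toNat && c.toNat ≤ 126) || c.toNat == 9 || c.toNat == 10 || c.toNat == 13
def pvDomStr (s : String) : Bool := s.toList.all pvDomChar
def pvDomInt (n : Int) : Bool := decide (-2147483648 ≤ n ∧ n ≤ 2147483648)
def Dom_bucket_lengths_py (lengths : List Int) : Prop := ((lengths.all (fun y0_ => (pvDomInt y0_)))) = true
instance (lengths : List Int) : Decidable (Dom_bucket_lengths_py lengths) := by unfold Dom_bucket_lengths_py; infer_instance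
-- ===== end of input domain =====

-- B replaces A's if/elif cascade with a threshold table searched by a hand-written bisect_left (idiomatic table-driven bucketing); same result.

-- ===== PORT A =====
def bucket_lengths_py (lengths : List Int) : List (String × Int) :=
  (lengths.foldl (fun buckets length =>
      if length ≤ 49 then buckets.modify "0-49" 0 (· + 1)
      else if length ≤ 100 then buckets.modify "50-100" 0 (· + 1)
      else if length ≤ 500 then buckets.modify "101-500" 0 (· + 1)
      else buckets.modify "501+" 0 (· + 1))
    ((((PySem.Dict.empty.insert "0-49" (0 : Int)).insert "50-100" 0).insert "101-500" 0).insert "501+" 0)).items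

-- ===== PORT B =====
-- the 'while lo < hi' loop of _bisect_left; a[mid] is always in range here, so getD is exact
def bisectLoop (a : List Int) (x : Int) (lo hi : Nat) : Nat :=
  if lo < hi then
    let mid := (lo + hi) / 2
    if a.getD mid 0 < x then bisectLoop a x (mid + 1) hi
    else bisectLoop a x lo mid
  else lo
termination_by hi - lo
decreasing_by all_goals omega

def bucket_lengths_py_alt (lengths : List Int) : List (String × Int) :=
  let thresholds : List Int := [49, 100, 500]
  let labels : List String := ["0-49", "50-100", "101-500", "501+"]
  let buckets := labels.foldl (fun d label => d.insert label (0 : Int)) PySem.Dict.empty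
  (lengths.foldl (fun buckets length =>
      buckets.modify (labels.getD (bisectLoop thresholds length 0 thresholds.length) "") 0 (· + 1))
    buckets).items

-- ===== PRECONDITION & SPEC =====
def Spec_bucket_lengths_py (lengths : List Int) (out : List (String × Int)) : Prop := out = bucket_lengths_py_alt lengths
instance (lengths : List Int) (out : List (String × Int)) : Decidable (Spec_bucket_lengths_py lengths out) := by unfold Spec_bucket_lengths_py; infer_instance

-- ===== CLAIM (what is proved, stated in full; the proofs are below) =====
def Claim_equal_bucket_lengths_py : Prop := ∀ (lengths : List Int), Dom_bucket_lengths_py lengths → Spec_bucket_lengths_py lengths (bucket_lengths_py lengths)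

-- ===== LEMMAS AND PROOFS =====
lemma bisectLoop_stop (a : List Int) (x : Int) (lo hi : Nat) (h : ¬ lo < hi) :
    bisectLoop a x lo hi = lo := by
  unfold bisectLoop; simp [h]

lemma bisect3 (x : Int) :
    bisectLoop [49, 100, 500] x 0 3 =
      if x ≤ 49 then 0 else if x ≤ 100 then 1 else if x ≤ 500 then 2 else 3 := by
  unfold bisectLoop
  norm_num
  split_ifs with h1 <;> (unfold bisectLoop; norm_num) <;> split_ifs with h2 <;>
    rw [bisectLoop_stop _ _ _ _ (by omega)] <;> omega

lemma step_eq (b : PySem.Dict String Int) (x : Int) :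
    b.modify (["0-49", "50-100", "101-500", "501+"].getD (bisectLoop [49, 100, 500] x 0 3) "") 0 (· + 1) =
      (if x ≤ 49 then b.modify "0-49" 0 (· + 1)
       else if x ≤ 100 then b.modify "50-100" 0 (· + 1)
       else if x ≤ 500 then b.modify "101-500" 0 (· + 1)
       else b.modify "501+" 0 (· + 1)) := by
  rw [bisect3]
  split_ifs <;> rfl

-- ===== VERDICT (by name: the statement is the Claim_ definition above) =====
theorem bucket_lengths_py_spec : Claim_equal_bucket_lengths_py := by
  intro lengths _
  unfold Spec_bucket_lengths_py bucket_lengths_py bucket_lengths_py_alt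
  simp only [List.length_cons, List.length_nil, Nat.reduceAdd]
  have hf : (fun (buckets : PySem.Dict String Int) (length : Int) =>
      buckets.modify (["0-49", "50-100", "101-500", "501+"].getD (bisectLoop [49, 100, 500] length 0 3) "") 0 (· + 1))
      = (fun (buckets : PySem.Dict String Int) (length : Int) =>
          if length ≤ 49 then buckets.modify "0-49" 0 (· + 1)
          else if length ≤ 100 then buckets.modify "50-100" 0 (· + 1)
          else if length ≤ 500 then buckets.modify "101-500" 0 (· + 1)
          else buckets.modify "501+" 0 (· + 1)) :=
    funext fun b => funext fun x => step_eq b x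
  rw [hf]
  rfl
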